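-- pv_equiv track=rewrite | github.com/linlifeng/oligo_design_api | app.py | visualize_hairpin
-- ===== SOURCE A (Python) =====
-- def visualize_hairpin(sequence):
--     # Create a structure string initialized with '.'
--     structure = ['.'] * len(sequence)
--
--     # A simple algorithm to find hairpin structures by checking for palindromes
--     seq_length = len(sequence)
--
--     for i in range(seq_length):
--         for j in range(i + 4, seq_length):  # Minimum loop size is 3
--             # Check for a palindromic sequence
--             if is_hairpin(sequence, i, j):
--                 # Mark the matching bases
--                 structure[i] = '('
--                 structure[j] = ')'
--                 # Optionally break after first found hairpin for simplicity
--                 break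
--
--     return ''.join(structure)
--
-- def is_hairpin(sequence, start, end):
--     """Check if the sequence from start to end forms a hairpin."""
--     if end - start < 3:
--         return False  # Minimum hairpin structure length
--
--     # Check for complementary bases (A-T, C-G)
--     for k in range((end - start + 1) // 2):
--         base1 = sequence[start + k]
--         base2 = sequence[end - k]
--         if not (base1 == 'A' and base2 == 'T' or base1 == 'T' and base2 == 'A' or
--                 base1 == 'C' and base2 == 'G' or base1 == 'G' and base2 == 'C'):
--             return False
--
--     return True
-- ===== SOURCE B (Python) =====
-- def visualize_hairpin(sequence):
--     # O(n^2) bottom-up DP over pair-complementarity instead of re-checking each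
--     # candidate stem pair from scratch; builds the output functionally.
--     n = len(sequence)
--     comp = {'A': 'T', 'T': 'A', 'C': 'G', 'G': 'C'}
--     match = [None] * n          # match[i] = smallest j >= i+4 closing a hairpin at i
--     nxt = [False] * n           # nxt[j] = "sequence[i+1..j] is a complement-palindrome"
--     for i in range(n - 1, -1, -1):
--         cur = [j > i and comp.get(sequence[i]) == sequence[j]
--                and (j - i <= 2 or nxt[j - 1]) for j in range(n)]
--         for j in range(i + 4, n):
--             if cur[j]:
--                 match[i] = j
--                 break
--         nxt = cur
--     targets = set(j for j in match if j is not None)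
--     return ''.join('(' if match[p] is not None else (')' if p in targets else '.')
--                    for p in range(n))
-- ===== Notes on version B (the rewrite author's own statement) =====
-- stated objective: faster
-- what changed: A re-checks every candidate stem pair (i,j) from scratch with an O(j-i) complementarity scan inside a doubly nested loop (O(n^3) worst case); B computes the complement-palindrome table by a bottom-up O(n^2) dynamic program (one boolean row per start index, derived from the previous row), reads each candidate off in O(1), and builds the output string functionally from the first-match table instead of mutating a character array in place.
import Mathlib
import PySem

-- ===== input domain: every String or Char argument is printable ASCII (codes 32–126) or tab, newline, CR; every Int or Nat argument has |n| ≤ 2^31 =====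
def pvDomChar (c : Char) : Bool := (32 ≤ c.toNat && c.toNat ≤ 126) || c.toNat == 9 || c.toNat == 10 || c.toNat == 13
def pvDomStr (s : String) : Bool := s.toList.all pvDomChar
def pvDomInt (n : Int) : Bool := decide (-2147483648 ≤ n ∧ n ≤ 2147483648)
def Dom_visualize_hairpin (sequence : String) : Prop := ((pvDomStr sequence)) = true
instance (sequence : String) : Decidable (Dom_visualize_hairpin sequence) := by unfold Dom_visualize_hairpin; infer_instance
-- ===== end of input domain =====

-- B replaces A's per-candidate-pair complementarity re-scan by a bottom-up DP over
-- pair-complementarity rows and builds the output string functionally.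

-- ===== PORT A =====
def vhIsHairpinLoop (s : List Char) (start stop : Int) : List Int → Bool
  | [] => true
  | k :: ks =>
    match PySem.List.pyGet? s (start + k), PySem.List.pyGet? s (stop - k) with
    | some base1, some base2 =>
      if (base1 == 'A' && base2 == 'T') || (base1 == 'T' && base2 == 'A') ||
         (base1 == 'C' && base2 == 'G') || (base1 == 'G' && base2 == 'C') then
        vhIsHairpinLoop s start stop ks
      else false
    | _, _ => false

def vhIsHairpin (s : List Char) (start stop : Int) : Bool :=
  if stop - start < 3 then false
  else vhIsHairpinLoop s start stop (PySem.List.pyRange 0 (PySem.Int.floordiv (stop - start + 1) 2) 1)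

def vhInner (s : List Char) (i : Int) : List Int → List Char → List Char
  | [], st => st
  | j :: js, st =>
    if vhIsHairpin s i j then PySem.List.pySetD (PySem.List.pySetD st i '(') j ')'
    else vhInner s i js st

def visualize_hairpin (sequence : String) : String :=
  let s := sequence.toList
  let n : Int := (s.length : Int)
  let structure0 := List.replicate s.length '.'
  String.ofList
    ((PySem.List.pyRange 0 n 1).foldl
      (fun st i => vhInner s i (PySem.List.pyRange (i + 4) n 1) st) structure0)

-- ===== PORT B =====
def vhCompDict : PySem.Dict Char Char :=
  ((((PySem.Dict.empty).insert 'A' 'T').insert 'T' 'A').insert 'C' 'G').insert 'G' 'C'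

def vhRow (s : List Char) (n i : Int) (nxt : List Bool) : List Bool :=
  (PySem.List.pyRange 0 n 1).map (fun j =>
    decide (i < j) &&
      (match PySem.List.pyGet? s i, PySem.List.pyGet? s j with
       | some ci, some cj =>
           (vhCompDict.get? ci == some cj) &&
           (decide (j - i ≤ 2) || (PySem.List.pyGet? nxt (j - 1)).getD false)
       | _, _ => false))

def vhFindJ (cur : List Bool) : List Int → Option Int
  | [] => none
  | j :: js => if (PySem.List.pyGet? cur j).getD false then some j else vhFindJ cur js

def vhRows (s : List Char) (n : Int) : List Int → List Bool → List (Option Int) → List (Option Int)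
  | [], _, acc => acc
  | i :: is, nxt, acc =>
    let cur := vhRow s n i nxt
    vhRows s n is cur (vhFindJ cur (PySem.List.pyRange (i + 4) n 1) :: acc)

def visualize_hairpin_alt (sequence : String) : String :=
  let s := sequence.toList
  let n : Int := (s.length : Int)
  let mtch := vhRows s n (PySem.List.pyRange (n - 1) (-1) (-1)) (List.replicate s.length false) []
  let targets : PySem.Set Int := PySem.Set.ofList (mtch.filterMap id)
  String.ofList ((PySem.List.pyRange 0 n 1).map (fun p =>
    if ((PySem.List.pyGet? mtch p).getD none).isSome then '('
    else if targets.contains p then ')' else '.'))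

-- ===== PRECONDITION & SPEC =====
def Spec_visualize_hairpin (sequence : String) (out : String) : Prop := out = visualize_hairpin_alt sequence
instance (sequence : String) (out : String) : Decidable (Spec_visualize_hairpin sequence out) := by unfold Spec_visualize_hairpin; infer_instance

-- ===== CLAIM (what is proved, stated in full; the proofs are below) =====
def Claim_equal_visualize_hairpin : Prop := ∀ (sequence : String), Dom_visualize_hairpin sequence → Spec_visualize_hairpin sequence (visualize_hairpin sequence)

-- ===== LEMMAS AND PROOFS =====
def vhPair (a b : Char) : Bool :=
  (a == 'A' && b == 'T') || (a == 'T' && b == 'A') || (a == 'C' && b == 'G') || (a == 'G' && b == 'C')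

def palB (s : List Char) (i j : Int) : Bool :=
  (PySem.List.pyRange 0 (PySem.Int.floordiv (j - i + 1) 2) 1).all
    (fun k => vhPair (PySem.List.pyGetD s (i + k) ' ') (PySem.List.pyGetD s (j - k) ' '))

def vhMJ (s : List Char) (i : Int) : Option Int :=
  (PySem.List.pyRange (i + 4) (s.length : Int) 1).find? (fun j => palB s i j)

def vhOut (s : List Char) (p : Int) : Char :=
  if (vhMJ s p).isSome then '('
  else if (PySem.List.pyRange 0 (s.length : Int) 1).any (fun i => vhMJ s i == some p) then ')'
  else '.'

lemma vh_pyGet?_some (s : List Char) (t : Int) (h0 : 0 ≤ t) (h1 : t < (s.length : Int)) :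
    PySem.List.pyGet? s t = some (PySem.List.pyGetD s t ' ') := by
  simp [PySem.List.pyGet?, PySem.List.pyGetD, PySem.List.pyIdx?, h0, h1]

lemma vhIsHairpinLoop_eq_all (s : List Char) (i j : Int) (l : List Int)
    (h : ∀ k ∈ l, 0 ≤ i + k ∧ i + k < (s.length : Int) ∧ 0 ≤ j - k ∧ j - k < (s.length : Int)) :
    vhIsHairpinLoop s i j l =
      l.all (fun k => vhPair (PySem.List.pyGetD s (i + k) ' ') (PySem.List.pyGetD s (j - k) ' ')) := by
  induction l with
  | nil => rfl
  | cons k ks ih =>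
    obtain ⟨h1, h2, h3, h4⟩ := h k (List.mem_cons_self ..)
    rw [List.all_cons, ← ih (fun x hx => h x (List.mem_cons_of_mem _ hx))]
    simp only [vhIsHairpinLoop, vh_pyGet?_some s _ h1 h2, vh_pyGet?_some s _ h3 h4]
    show (if vhPair (PySem.List.pyGetD s (i + k) ' ') (PySem.List.pyGetD s (j - k) ' ') = true
          then vhIsHairpinLoop s i j ks else false) = _
    cases hp : vhPair (PySem.List.pyGetD s (i + k) ' ') (PySem.List.pyGetD s (j - k) ' ') <;> simp [hp]

lemma vhIsHairpin_eq_palB (s : List Char) (i j : Int) (h0 : 0 ≤ i) (h4 : i + 4 ≤ j)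
    (hj : j < (s.length : Int)) : vhIsHairpin s i j = palB s i j := by
  unfold vhIsHairpin
  rw [if_neg (by omega)]
  rw [vhIsHairpinLoop_eq_all]
  · rfl
  · intro k hk
    rw [PySem.List.mem_pyRange_one] at hk
    rw [PySem.Int.floordiv_eq_ediv_of_pos (by omega)] at hk
    omega

lemma vhInner_eq_find (s : List Char) (i : Int) (h0 : 0 ≤ i) (l : List Int) (st : List Char)
    (h : ∀ j ∈ l, i + 4 ≤ j ∧ j < (s.length : Int)) :
    vhInner s i l st =
      match l.find? (fun j => palB s i j) with
      | some j => PySem.List.pySetD (PySem.List.pySetD st i '(') j ')'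
      | none => st := by
  induction l with
  | nil => rfl
  | cons j js ih =>
    obtain ⟨hj1, hj2⟩ := h j (List.mem_cons_self ..)
    rw [List.find?_cons]
    show (if vhIsHairpin s i j = true then _ else vhInner s i js st) = _
    rw [vhIsHairpin_eq_palB s i j h0 hj1 hj2]
    cases hp : palB s i j with
    | true => simp
    | false => simpa using ih (fun x hx => h x (List.mem_cons_of_mem _ hx))

lemma vhSetMap (f : Int → Char) (N q : Int) (v : Char) (h0 : 0 ≤ q) (hq : q < N) :
    PySem.List.pySetD ((PySem.List.pyRange 0 N 1).map f) q v =
      (PySem.List.pyRange 0 N 1).map (fun p => if p = q then v else f p) := by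
  rw [PySem.List.pySetD_of_nonneg _ v h0]
  apply List.ext_getElem
  · simp
  · intro m hm1 hm2
    simp only [List.getElem_set, List.getElem_map, PySem.List.getElem_pyRange_one]
    have hm : m < (N).toNat := by simpa [PySem.List.length_pyRange_one] using hm2
    by_cases he : m = q.toNat
    · rw [if_pos (by omega : q.toNat = m), if_pos (by omega : (0:Int) + (m:Int) = q)]
    · rw [if_neg (by omega : ¬ q.toNat = m), if_neg (by omega : ¬ (0:Int) + (m:Int) = q)]

lemma vhFold_char (s : List Char) (t : Nat) (ht : t ≤ s.length) :
    (PySem.List.pyRange 0 (t : Int) 1).foldl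
        (fun st i => vhInner s i (PySem.List.pyRange (i + 4) (s.length : Int) 1) st)
        (List.replicate s.length '.') =
      (PySem.List.pyRange 0 (s.length : Int) 1).map (fun p =>
        if p < (t : Int) ∧ (vhMJ s p).isSome then '('
        else if (PySem.List.pyRange 0 (t : Int) 1).any (fun i => vhMJ s i == some p) then ')'
        else '.') := by
  induction t with
  | zero =>
    rw [PySem.List.pyRange_one_eq_nil (by omega)]
    simp only [List.foldl_nil, List.any_nil]
    apply List.ext_getElem
    · simp [PySem.List.length_pyRange_one]
    · intro m hm1 hm2
      simp [PySem.List.getElem_pyRange_one]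
  | succ t ih =>
    have hts : (((t + 1 : Nat)) : Int) = ((t : Int) + 1) := by push_cast; ring
    rw [hts, PySem.List.pyRange_one_succ_right (by omega), List.foldl_append, List.foldl_cons,
      List.foldl_nil, ih (by omega)]
    rw [vhInner_eq_find s (t : Int) (by omega) _ _
      (fun j hj => by rw [PySem.List.mem_pyRange_one] at hj; omega)]
    rw [show (PySem.List.pyRange ((t : Int) + 4) ((s.length : Int)) 1).find?
          (fun j => palB s (t : Int) j) = vhMJ s (t : Int) from rfl]
    cases hMJ : vhMJ s (t : Int) with
    | none =>
      dsimp only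
      apply List.map_congr_left
      intro p hp
      rw [PySem.List.mem_pyRange_one] at hp
      rw [List.any_append, List.any_cons, List.any_nil, hMJ]
      by_cases hpt : p = (t : Int)
      · subst hpt
        have hb : (((none : Option Int)) == some ((t : Int))) = false := rfl
        simp only [hMJ, Option.isSome_none, Bool.false_eq_true, and_false, if_false, hb,
          Bool.or_false]
      · have h1 : (p < (t : Int) + 1 ∧ (vhMJ s p).isSome) ↔ (p < (t : Int) ∧ (vhMJ s p).isSome) :=
          ⟨fun ⟨a, b⟩ => ⟨by omega, b⟩, fun ⟨a, b⟩ => ⟨by omega, b⟩⟩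
        have hb : (((none : Option Int)) == some p) = false := rfl
        rw [if_congr h1 rfl rfl]
        simp only [hb, Bool.or_false]
    | some j =>
      dsimp only
      have hjmem := List.mem_of_find?_eq_some hMJ
      rw [PySem.List.mem_pyRange_one] at hjmem
      rw [vhSetMap _ _ _ _ (by omega) (by omega),
          vhSetMap _ _ _ _ (by omega) (by omega)]
      apply List.map_congr_left
      intro p hp
      rw [PySem.List.mem_pyRange_one] at hp
      rw [List.any_append, List.any_cons, List.any_nil, hMJ]
      by_cases hpj : p = j
      · subst hpj
        rw [if_pos rfl, if_neg (by omega : ¬(p < (t : Int) + 1 ∧ (vhMJ s p).isSome = true)),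
          if_pos (by simp)]
      · rw [if_neg hpj]
        by_cases hpt : p = (t : Int)
        · subst hpt
          rw [if_pos rfl, if_pos ⟨by omega, by simp [hMJ]⟩]
        · rw [if_neg hpt]
          have h1 : (p < (t : Int) + 1 ∧ (vhMJ s p).isSome) ↔ (p < (t : Int) ∧ (vhMJ s p).isSome) :=
            ⟨fun ⟨a, b⟩ => ⟨by omega, b⟩, fun ⟨a, b⟩ => ⟨by omega, b⟩⟩
          rw [if_congr h1 rfl rfl]
          have h2 : (some j == some p) = false := by simpa using fun h => hpj h.symm
          rw [h2, Bool.false_or, Bool.or_false]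

lemma vhA_eq (sequence : String) :
    visualize_hairpin sequence =
      String.ofList ((PySem.List.pyRange 0 (sequence.toList.length : Int) 1).map (vhOut sequence.toList)) := by
  unfold visualize_hairpin
  dsimp only
  rw [vhFold_char sequence.toList sequence.toList.length le_rfl]
  congr 1
  apply List.map_congr_left
  intro p hp
  rw [PySem.List.mem_pyRange_one] at hp
  unfold vhOut
  rw [if_congr (and_iff_right_of_imp (fun _ => hp.2)) rfl rfl]

lemma vhCompDict_get (a b : Char) : (vhCompDict.get? a == some b) = vhPair a b := by
  by_cases hA : a = 'A'
  · subst hA; simp [vhCompDict, PySem.Dict.get?, PySem.Dict.insert, PySem.Dict.empty, vhPair, eq_comm]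
  · by_cases hT : a = 'T'
    · subst hT; simp [vhCompDict, PySem.Dict.get?, PySem.Dict.insert, PySem.Dict.empty, vhPair, eq_comm]
    · by_cases hC : a = 'C'
      · subst hC; simp [vhCompDict, PySem.Dict.get?, PySem.Dict.insert, PySem.Dict.empty, vhPair, eq_comm]
      · by_cases hG : a = 'G'
        · subst hG; simp [vhCompDict, PySem.Dict.get?, PySem.Dict.insert, PySem.Dict.empty, vhPair, eq_comm]
        · have hA' : ('A' == a) = false := by simpa using fun h => hA h.symm
          have hT' : ('T' == a) = false := by simpa using fun h => hT h.symm
          have hC' : ('C' == a) = false := by simpa using fun h => hC h.symm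
          have hG' : ('G' == a) = false := by simpa using fun h => hG h.symm
          have : List.find? (fun p => p.1 == a)
              [('A', 'T'), ('T', 'A'), ('C', 'G'), ('G', 'C')] = none := by
            simp [List.find?, hA', hT', hC', hG']
          simp [vhCompDict, PySem.Dict.get?, PySem.Dict.insert, PySem.Dict.empty, vhPair,
            hA, hT, hC, hG, this]

lemma palB_char (s : List Char) (a b : Int) :
    palB s a b = true ↔ ∀ k : Int, 0 ≤ k → k < (b - a + 1) / 2 →
      vhPair (PySem.List.pyGetD s (a + k) ' ') (PySem.List.pyGetD s (b - k) ' ') = true := by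
  rw [palB, List.all_eq_true, PySem.Int.floordiv_eq_ediv_of_pos (by omega)]
  constructor
  · intro H k h1 h2
    exact H k (by rw [PySem.List.mem_pyRange_one]; omega)
  · intro H k hk
    rw [PySem.List.mem_pyRange_one] at hk
    exact H k (by omega) (by omega)

lemma palB_rec (s : List Char) (i j : Int) (h0 : 0 ≤ i) (hij : i < j) (hj : j < (s.length : Int)) :
    palB s i j =
      (vhPair (PySem.List.pyGetD s i ' ') (PySem.List.pyGetD s j ' ') &&
        (decide (j - i ≤ 2) || palB s (i + 1) (j - 1))) := by
  rw [Bool.eq_iff_iff, Bool.and_eq_true, Bool.or_eq_true, decide_eq_true_eq, palB_char, palB_char]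
  constructor
  · intro H
    refine ⟨?_, ?_⟩
    · have := H 0 le_rfl (by omega)
      simpa using this
    · by_cases h2 : j - i ≤ 2
      · exact Or.inl h2
      · refine Or.inr (fun k' hk1 hk2 => ?_)
        rw [show i + 1 + k' = i + (k' + 1) by ring, show j - 1 - k' = j - (k' + 1) by ring]
        exact H (k' + 1) (by omega) (by omega)
  · rintro ⟨H0, Hd⟩ k hk1 hk2
    by_cases hk0 : k = 0
    · subst hk0; simpa using H0
    · cases Hd with
      | inl h2 => omega
      | inr H' =>
        have := H' (k - 1) (by omega) (by omega)
        rw [show i + 1 + (k - 1) = i + k by ring, show j - 1 - (k - 1) = j - k by ring] at this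
        exact this

def vhRowOK (s : List Char) (a : Int) (l : List Bool) : Prop :=
  ∀ j : Int, 0 ≤ j → j < (s.length : Int) →
    PySem.List.pyGetD l j false = (decide (a < j) && palB s a j)

lemma vhRow_ok (s : List Char) (i : Int) (nxt : List Bool) (h0 : 0 ≤ i)
    (hi : i < (s.length : Int)) (hnxt : vhRowOK s (i + 1) nxt) :
    vhRowOK s i (vhRow s (s.length : Int) i nxt) := by
  intro j hj0 hjn
  rw [vhRow, PySem.List.pyGetD_map_pyRange_of_nonneg _ _ _ _ hj0 hjn]
  by_cases hij : i < j
  · rw [vh_pyGet?_some s i h0 hi, vh_pyGet?_some s j hj0 hjn]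
    dsimp only
    rw [show ((PySem.List.pyGet? nxt (j - 1)).getD false) = PySem.List.pyGetD nxt (j - 1) false
        from rfl,
      vhCompDict_get, hnxt (j - 1) (by omega) (by omega),
      palB_rec s i j h0 hij hjn]
    by_cases h2 : j - i ≤ 2
    · simp [h2]
    · have h3 : i + 1 < j - 1 := by omega
      simp [h2, h3]
  · simp [hij]

lemma vhFindJ_eq_find (s : List Char) (i : Int) (cur : List Bool) (hcur : vhRowOK s i cur)
    (l : List Int) (h : ∀ j ∈ l, i < j ∧ 0 ≤ j ∧ j < (s.length : Int)) :
    vhFindJ cur l = l.find? (fun j => palB s i j) := by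
  induction l with
  | nil => rfl
  | cons j js ih =>
    obtain ⟨h1, h2, h3⟩ := h j (List.mem_cons_self ..)
    rw [vhFindJ, List.find?_cons,
      show ((PySem.List.pyGet? cur j).getD false) = PySem.List.pyGetD cur j false from rfl,
      hcur j h2 h3]
    rw [decide_eq_true h1, Bool.true_and]
    cases hp : palB s i j with
    | true => simp
    | false => simpa using ih (fun x hx => h x (List.mem_cons_of_mem _ hx))

lemma vhRows_eq_map (s : List Char) (i : Int) (hlo : -1 ≤ i) (hhi : i < (s.length : Int))
    (nxt : List Bool) (acc : List (Option Int)) (hnxt : vhRowOK s (i + 1) nxt) :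
    vhRows s (s.length : Int) (PySem.List.pyRange i (-1) (-1)) nxt acc =
      (PySem.List.pyRange 0 (i + 1) 1).map (vhMJ s) ++ acc := by
  have hnat : (i + 1).toNat ≤ s.length := by omega
  induction hn : (i + 1).toNat generalizing i nxt acc with
  | zero =>
    have hi : i = -1 := by omega
    subst hi
    rw [PySem.List.pyRange_neg_one_eq_nil le_rfl, PySem.List.pyRange_one_eq_nil (by omega)]
    rfl
  | succ m ih =>
    have hi0 : 0 ≤ i := by omega
    rw [PySem.List.pyRange_neg_one_cons (by omega)]
    rw [vhRows]
    have hcur := vhRow_ok s i nxt hi0 hhi hnxt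
    rw [vhFindJ_eq_find s i _ hcur _
      (fun j hj => by rw [PySem.List.mem_pyRange_one] at hj; omega)]
    rw [show (PySem.List.pyRange (i + 4) ((s.length : Int)) 1).find?
          (fun j => palB s i j) = vhMJ s i from rfl]
    rw [ih (i - 1) (by omega) (by omega) _ _ (by simpa using hcur) (by omega) (by omega)]
    rw [show i - 1 + 1 = i by ring, PySem.List.pyRange_one_succ_right (by omega), List.map_append]
    simp

lemma vhB_eq (sequence : String) :
    visualize_hairpin_alt sequence =
      String.ofList ((PySem.List.pyRange 0 (sequence.toList.length : Int) 1).map (vhOut sequence.toList)) := by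
  unfold visualize_hairpin_alt
  dsimp only
  have hrows : vhRows sequence.toList (sequence.toList.length : Int)
      (PySem.List.pyRange ((sequence.toList.length : Int) - 1) (-1) (-1))
      (List.replicate sequence.toList.length false) [] =
      (PySem.List.pyRange 0 (sequence.toList.length : Int) 1).map (vhMJ sequence.toList) := by
    rw [vhRows_eq_map sequence.toList ((sequence.toList.length : Int) - 1) (by omega) (by omega) _ _
      (fun j hj0 hjn => by
        rw [PySem.List.pyGetD_eq_getElem _ _ hj0 (by simpa using hjn)]
        rw [decide_eq_false (by omega : ¬ ((sequence.toList.length : Int) - 1 + 1 < j))]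
        simp)]
    rw [show (sequence.toList.length : Int) - 1 + 1 = (sequence.toList.length : Int) by ring]
    rw [List.append_nil]
  rw [hrows]
  congr 1
  apply List.map_congr_left
  intro p hp
  rw [PySem.List.mem_pyRange_one] at hp
  rw [show ((PySem.List.pyGet? ((PySem.List.pyRange 0 ((sequence.toList.length : Int)) 1).map
        (vhMJ sequence.toList)) p).getD none) = PySem.List.pyGetD ((PySem.List.pyRange 0
        ((sequence.toList.length : Int)) 1).map (vhMJ sequence.toList)) p none from rfl,
    PySem.List.pyGetD_map_pyRange_of_nonneg _ _ _ _ hp.1 hp.2]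
  unfold vhOut
  have hiff : (PySem.Set.ofList (((PySem.List.pyRange 0 ((sequence.toList.length : Int)) 1).map
      (vhMJ sequence.toList)).filterMap id)).contains p = true ↔
      ((PySem.List.pyRange 0 ((sequence.toList.length : Int)) 1).any
        (fun i => vhMJ sequence.toList i == some p)) = true := by
    refine Iff.trans List.contains_iff_mem ?_
    rw [PySem.Set.mem_ofList, List.mem_filterMap, List.any_eq_true]
    constructor
    · rintro ⟨o, ho, hid⟩
      rw [List.mem_map] at ho
      obtain ⟨i, hi, rfl⟩ := ho
      exact ⟨i, hi, by simpa using hid⟩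
    · rintro ⟨i, hi, hbeq⟩
      exact ⟨vhMJ sequence.toList i, List.mem_map_of_mem hi, by simpa using hbeq⟩
  exact if_congr Iff.rfl rfl (if_congr hiff rfl rfl)

-- ===== VERDICT (by name: the statement is the Claim_ definition above) =====
theorem visualize_hairpin_spec : Claim_equal_visualize_hairpin := by
  intro sequence _
  unfold Spec_visualize_hairpin
  rw [vhA_eq, vhB_eq]
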